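-- pv_equiv track=rewrite | github.com/KimGroup/trimer-tbg | mc/pocket.py | monomer_dimer
-- ===== SOURCE A (Python) =====
-- height = 108
--
-- width = 108
--
-- def recenter_mono(pos):
--     return (pos[0] % width, pos[1] % height)
--
-- def center_mono(c, pos):
--     r = recenter_mono((pos[0]-c[0]+width//2, pos[1]-c[1]+height//2))
--     return r[0]-width//2, r[1]-height//2
--
-- def rotate(pos, dir):
--     match dir % 6:
--         case 0: return pos
--         case 1: return (-pos[1], pos[0]+pos[1])
--         case 2: return (-pos[0]-pos[1], pos[0])
--         case 3: return (-pos[0], -pos[1])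
--         case 4: return (pos[1], -pos[0]-pos[1])
--         case 5: return (pos[0]+pos[1], -pos[0])
--
-- def monomer_dimer(pos):
--     pos = list(pos)
--     for i in range(len(pos)):
--         for j in range(i+1, len(pos)):
--             c = None
--             for dx, dy, r in [(1, 0, 0), (0, 1, 1), (-1, 1, 2)]:
--                 if (pos[i][0] + dx) % width == pos[j][0] and (pos[i][1] + dy) % height == pos[j][1]:
--                     c = pos[i]
--                     rot = r
--                     break
--                 if (pos[j][0] + dx) % width == pos[i][0] and (pos[j][1] + dy) % height == pos[i][1]:
--                     c = pos[j]
--                     rot = r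
--                     break
--
--             if c is not None:
--                 for k in range(len(pos)):
--                     if k == i or k == j:
--                         continue
--                     yield center_mono((0, 0), rotate(center_mono(c, pos[k]), -rot))
--                     if pos[0] != (0, 0):
--                         pass
-- ===== SOURCE B (Python) =====
-- height = 108
--
-- width = 108
--
--
-- def _recenter_mono(pos):
--     return (pos[0] % width, pos[1] % height)
--
--
-- def _center_mono(c, pos):
--     r = _recenter_mono((pos[0] - c[0] + width // 2, pos[1] - c[1] + height // 2))
--     return r[0] - width // 2, r[1] - height // 2
--
--
-- def _rotate(pos, dir):
--     match dir % 6: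
--         case 0: return pos
--         case 1: return (-pos[1], pos[0] + pos[1])
--         case 2: return (-pos[0] - pos[1], pos[0])
--         case 3: return (-pos[0], -pos[1])
--         case 4: return (pos[1], -pos[0] - pos[1])
--         case 5: return (pos[0] + pos[1], -pos[0])
--
--
-- OFFS = [(1, 0), (0, 1), (-1, 1)]
--
--
-- def monomer_dimer(pos):
--     pos = [(p[0], p[1]) for p in pos]
--     n = len(pos)
--     # index the positions once: raw value -> indices, and shifted value -> indices (per offset)
--     fwd = {}
--     for j, p in enumerate(pos):
--         fwd.setdefault(p, []).append(j)
--     rev = []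
--     for dx, dy in OFFS:
--         d = {}
--         for j, p in enumerate(pos):
--             d.setdefault(((p[0] + dx) % width, (p[1] + dy) % height), []).append(j)
--         rev.append(d)
--     for i in range(n):
--         pi = pos[i]
--         # all hits (j, c, rot) in forward-before-reverse, offset-order precedence
--         hits = []
--         for r, (dx, dy) in enumerate(OFFS):
--             key = ((pi[0] + dx) % width, (pi[1] + dy) % height)
--             hits += [(j, pi, r) for j in fwd.get(key, []) if j > i]
--             hits += [(j, pos[j], r) for j in rev[r].get(pi, []) if j > i]
--         for j in sorted(set(j for j, _, _ in hits)):
--             c, rot = next((c, r) for (jj, c, r) in hits if jj == j)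
--             for k in range(n):
--                 if k != i and k != j:
--                     yield _center_mono((0, 0), _rotate(_center_mono(c, pos[k]), -rot))
-- ===== Notes on version B (the rewrite author's own statement) =====
-- stated objective: faster
-- what changed: B replaces A's all-pairs O(n^2) neighbour scan by hash indexes built once (position -> index list and shifted position -> index list per offset); each monomer probes its six lattice neighbours by dictionary lookup, resolves the forward-before-reverse offset precedence on the hit list, and emits over ascending candidates, so pair discovery is O(n) expected instead of O(n^2).
import Mathlib
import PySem

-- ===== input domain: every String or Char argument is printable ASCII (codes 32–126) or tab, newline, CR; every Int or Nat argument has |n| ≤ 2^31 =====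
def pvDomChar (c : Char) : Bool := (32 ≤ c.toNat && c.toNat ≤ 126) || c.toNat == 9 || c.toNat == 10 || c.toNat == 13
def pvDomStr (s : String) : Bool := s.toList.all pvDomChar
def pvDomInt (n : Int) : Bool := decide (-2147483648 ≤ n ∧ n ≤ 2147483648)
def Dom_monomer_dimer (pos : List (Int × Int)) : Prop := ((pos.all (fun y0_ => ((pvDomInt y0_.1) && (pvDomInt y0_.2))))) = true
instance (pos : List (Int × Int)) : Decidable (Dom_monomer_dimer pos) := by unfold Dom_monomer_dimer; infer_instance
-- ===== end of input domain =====

-- B replaces A's all-pairs O(n^2) neighbour scan by hash indexes (position -> indices and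
-- shifted position -> indices) probed six times per monomer; the emitted values and their
-- order are identical (A's dead 'if pos[0] != (0,0): pass' branch is a no-op and is dropped).

-- ===== PORT A =====
-- helpers shared verbatim by both Python files (recenter_mono / center_mono / rotate)
def pvRecenter (p : Int × Int) : Int × Int :=
  (PySem.Int.mod p.1 108, PySem.Int.mod p.2 108)

def pvCenter (c p : Int × Int) : Int × Int :=
  let r := pvRecenter (p.1 - c.1 + 54, p.2 - c.2 + 54)
  (r.1 - 54, r.2 - 54)

-- dir % 6 is always in [0,6), so the final else is exactly the 'case 5' arm
def pvRotate (p : Int × Int) (dir : Int) : Int × Int :=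
  let m := PySem.Int.mod dir 6
  if m = 0 then p
  else if m = 1 then (-p.2, p.1 + p.2)
  else if m = 2 then (-p.1 - p.2, p.1)
  else if m = 3 then (-p.1, -p.2)
  else if m = 4 then (p.2, -p.1 - p.2)
  else (p.1 + p.2, -p.1)

-- the value yielded for one k: center_mono((0,0), rotate(center_mono(c, pk), -rot))
def pvYield (c pk : Int × Int) (rot : Int) : Int × Int :=
  pvCenter (0, 0) (pvRotate (pvCenter c pk) (-rot))

-- pos[i] for an index produced by range(len(pos)) / the dicts: always in range
def pvGet (pos : List (Int × Int)) (i : Int) : Int × Int :=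
  PySem.List.pyGetD pos i (0, 0)

-- A's inner 'for dx, dy, r in [...]' loop with break
def pvOffs3 : List (Int × Int × Int) := [(1, 0, 0), (0, 1, 1), (-1, 1, 2)]

def pvFindC (pi pj : Int × Int) : List (Int × Int × Int) → Option ((Int × Int) × Int)
  | [] => none
  | (dx, dy, r) :: rest =>
    if PySem.Int.mod (pi.1 + dx) 108 = pj.1 ∧ PySem.Int.mod (pi.2 + dy) 108 = pj.2 then
      some (pi, r)
    else if PySem.Int.mod (pj.1 + dx) 108 = pi.1 ∧ PySem.Int.mod (pj.2 + dy) 108 = pi.2 then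
      some (pj, r)
    else pvFindC pi pj rest

def monomer_dimer (pos : List (Int × Int)) : List (Int × Int) :=
  let n := PySem.List.len pos
  (PySem.List.pyRange 0 n 1).foldl (fun acc i =>
    (PySem.List.pyRange (i + 1) n 1).foldl (fun acc j =>
      match pvFindC (pvGet pos i) (pvGet pos j) pvOffs3 with
      | none => acc
      | some (c, rot) =>
        (PySem.List.pyRange 0 n 1).foldl (fun acc k =>
          if k = i ∨ k = j then acc
          else acc ++ [pvYield c (pvGet pos k) rot]) acc) acc) []

-- ===== PORT B =====
def pvOffs2 : List (Int × Int) := [(1, 0), (0, 1), (-1, 1)]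

def pvShift (p : Int × Int) (dx dy : Int) : Int × Int :=
  (PySem.Int.mod (p.1 + dx) 108, PySem.Int.mod (p.2 + dy) 108)

-- 'd.setdefault(key(p), []).append(j)' over enumerate(pos)
def pvIndexBy (pos : List (Int × Int)) (key : Int × Int → Int × Int) :
    PySem.Dict (Int × Int) (List Int) :=
  (PySem.List.enumerate pos 0).foldl
    (fun d jp => d.modify (key jp.2) [] (· ++ [jp.1])) PySem.Dict.empty

def monomer_dimer_alt (pos : List (Int × Int)) : List (Int × Int) :=
  let n := PySem.List.len pos
  let fwd := pvIndexBy pos (fun p => p)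
  let rev := pvOffs2.map (fun o => pvIndexBy pos (fun p => pvShift p o.1 o.2))
  (PySem.List.pyRange 0 n 1).foldl (fun acc i =>
    let pi := pvGet pos i
    let hits := (PySem.List.enumerate pvOffs2 0).foldl (fun hs ro =>
      let hs := hs ++ (fwd.getD (pvShift pi ro.2.1 ro.2.2) []).filterMap
        (fun j => if j > i then some (j, pi, ro.1) else none)
      hs ++ (((PySem.List.pyGetD rev ro.1 PySem.Dict.empty).getD pi []).filterMap
        (fun j => if j > i then some (j, pvGet pos j, ro.1) else none))) []
    (PySem.List.sorted (PySem.Set.ofList (hits.map (·.1))) (fun x => x) false).foldl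
      (fun acc j =>
        let cr := (((hits.find? (fun h => h.1 == j)).map (fun h => h.2)).getD ((0, 0), 0))
        (PySem.List.pyRange 0 n 1).foldl (fun acc k =>
          if k = i ∨ k = j then acc
          else acc ++ [pvYield cr.1 (pvGet pos k) cr.2]) acc) acc) []

-- ===== PRECONDITION & SPEC =====
def Spec_monomer_dimer (pos : List (Int × Int)) (out : List (Int × Int)) : Prop := out = monomer_dimer_alt pos
instance (pos : List (Int × Int)) (out : List (Int × Int)) : Decidable (Spec_monomer_dimer pos out) := by unfold Spec_monomer_dimer; infer_instance

-- ===== CLAIM (what is proved, stated in full; the proofs are below) =====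
def Claim_equal_monomer_dimer : Prop := ∀ (pos : List (Int × Int)), Dom_monomer_dimer pos → Spec_monomer_dimer pos (monomer_dimer pos)


-- ===== LEMMAS AND PROOFS =====

-- proof-side names for the pieces of both programs

-- A's k-loop output for one matched pair (i, j)
def pvEmitL (pos : List (Int × Int)) (i j : Int) (c : Int × Int) (rot : Int) : List (Int × Int) :=
  ((PySem.List.pyRange 0 (PySem.List.len pos) 1).filter (fun k => decide (¬(k = i ∨ k = j)))).map
    (fun k => pvYield c (pvGet pos k) rot)

-- A's contribution of the pair (i, j)
def pvPairOut (pos : List (Int × Int)) (i j : Int) : List (Int × Int) :=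
  match pvFindC (pvGet pos i) (pvGet pos j) pvOffs3 with
  | none => []
  | some (c, rot) => pvEmitL pos i j c rot

-- B's six hit blocks for monomer i
def pvBF (pos : List (Int × Int)) (i r dx dy : Int) : List (Int × (Int × Int) × Int) :=
  ((pvIndexBy pos (fun p => p)).getD (pvShift (pvGet pos i) dx dy) []).filterMap
    (fun j => if j > i then some (j, pvGet pos i, r) else none)

def pvBR (pos : List (Int × Int)) (i r dx dy : Int) : List (Int × (Int × Int) × Int) :=
  ((pvIndexBy pos (fun p => pvShift p dx dy)).getD (pvGet pos i) []).filterMap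
    (fun j => if j > i then some (j, pvGet pos j, r) else none)

def pvHits (pos : List (Int × Int)) (i : Int) : List (Int × (Int × Int) × Int) :=
  pvBF pos i 0 1 0 ++ pvBR pos i 0 1 0 ++ pvBF pos i 1 0 1 ++ pvBR pos i 1 0 1 ++
    pvBF pos i 2 (-1) 1 ++ pvBR pos i 2 (-1) 1

-- generic list facts specific to the shapes above
theorem pv_filterMap_if {α β : Type} (p : α → Prop) [DecidablePred p] (f : α → β) (l : List α) :
    l.filterMap (fun x => if p x then some (f x) else none) =
      (l.filter (fun x => decide (p x))).map f := by
  induction l with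
  | nil => rfl
  | cons a t ih =>
    by_cases h : p a <;> simp [h, ih]

theorem pv_find?_beq_self (l : List Int) (j : Int) :
    l.find? (· == j) = if j ∈ l then some j else none := by
  induction l with
  | nil => simp
  | cons a t ih =>
    by_cases h : a = j
    · subst h; simp
    · simp [h, ih, Ne.symm h]

theorem pv_flatMap_congr {α β : Type} (l : List α) (f g : α → List β)
    (h : ∀ x ∈ l, f x = g x) : l.flatMap f = l.flatMap g := by
  induction l with
  | nil => rfl
  | cons a t ih =>
    simp only [List.flatMap_cons]
    rw [h a (by simp), ih (fun x hx => h x (by simp [hx]))]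

theorem pv_flatMap_filter {α β : Type} (l : List α) (p : α → Bool) (f g : α → List β)
    (h0 : ∀ x ∈ l, p x = false → g x = [])
    (h1 : ∀ x ∈ l, p x = true → f x = g x) :
    (l.filter p).flatMap f = l.flatMap g := by
  induction l with
  | nil => rfl
  | cons a t ih =>
    have ih' := ih (fun x hx hp => h0 x (by simp [hx]) hp) (fun x hx hp => h1 x (by simp [hx]) hp)
    by_cases hp : p a
    · simp only [List.filter_cons, hp, if_true, List.flatMap_cons]
      rw [h1 a (by simp) hp, ih']
    · simp only [List.filter_cons, Bool.not_eq_true] at *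
      simp only [hp, Bool.false_eq_true, if_false, List.flatMap_cons]
      rw [h0 a (by simp) (by simp [hp]), ih']
      simp

-- the k-loop is pvEmitL
theorem pv_kfold (pos : List (Int × Int)) (i j : Int) (c : Int × Int) (rot : Int)
    (acc : List (Int × Int)) :
    (PySem.List.pyRange 0 (PySem.List.len pos) 1).foldl (fun acc k =>
        if k = i ∨ k = j then acc
        else acc ++ [pvYield c (pvGet pos k) rot]) acc = acc ++ pvEmitL pos i j c rot := by
  unfold pvEmitL
  rw [PySem.List.foldl_congr_mem (PySem.List.pyRange 0 (PySem.List.len pos) 1)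
      (fun acc k => if k = i ∨ k = j then acc else acc ++ [pvYield c (pvGet pos k) rot])
      (fun acc k => if ¬(k = i ∨ k = j) then acc ++ [pvYield c (pvGet pos k) rot] else acc)
      acc (by intro acc k _; by_cases h : k = i ∨ k = j <;> simp [h])]
  rw [PySem.List.foldl_append_ite]

-- A as a flatMap over pairs
theorem pv_A_eq (pos : List (Int × Int)) :
    monomer_dimer pos =
      (PySem.List.pyRange 0 (PySem.List.len pos) 1).flatMap (fun i =>
        (PySem.List.pyRange (i + 1) (PySem.List.len pos) 1).flatMap (pvPairOut pos i)) := by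
  have hA : monomer_dimer pos =
      (PySem.List.pyRange 0 (PySem.List.len pos) 1).foldl (fun acc i =>
        (PySem.List.pyRange (i + 1) (PySem.List.len pos) 1).foldl (fun acc j =>
          match pvFindC (pvGet pos i) (pvGet pos j) pvOffs3 with
          | none => acc
          | some (c, rot) =>
            (PySem.List.pyRange 0 (PySem.List.len pos) 1).foldl (fun acc k =>
              if k = i ∨ k = j then acc
              else acc ++ [pvYield c (pvGet pos k) rot]) acc) acc) [] := rfl
  rw [hA]
  have h1 : ∀ (i : Int) (acc : List (Int × Int)),
      (PySem.List.pyRange (i + 1) (PySem.List.len pos) 1).foldl (fun acc j =>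
        match pvFindC (pvGet pos i) (pvGet pos j) pvOffs3 with
        | none => acc
        | some (c, rot) =>
          (PySem.List.pyRange 0 (PySem.List.len pos) 1).foldl (fun acc k =>
            if k = i ∨ k = j then acc
            else acc ++ [pvYield c (pvGet pos k) rot]) acc) acc
      = acc ++ (PySem.List.pyRange (i + 1) (PySem.List.len pos) 1).flatMap (pvPairOut pos i) := by
    intro i acc
    rw [PySem.List.foldl_congr_mem (PySem.List.pyRange (i + 1) (PySem.List.len pos) 1)
        (fun acc j =>
          match pvFindC (pvGet pos i) (pvGet pos j) pvOffs3 with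
          | none => acc
          | some (c, rot) =>
            (PySem.List.pyRange 0 (PySem.List.len pos) 1).foldl (fun acc k =>
              if k = i ∨ k = j then acc
              else acc ++ [pvYield c (pvGet pos k) rot]) acc)
        (fun acc j => acc ++ pvPairOut pos i j) acc
        (by
          intro acc j _
          unfold pvPairOut
          rcases hF : pvFindC (pvGet pos i) (pvGet pos j) pvOffs3 with _ | ⟨c, rot⟩
          · simp [hF]
          · simp only [hF]; rw [pv_kfold])]
    rw [PySem.List.foldl_append_eq_flatMap]
  rw [PySem.List.foldl_congr_mem (PySem.List.pyRange 0 (PySem.List.len pos) 1) _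
      (fun acc i => acc ++ (PySem.List.pyRange (i + 1) (PySem.List.len pos) 1).flatMap (pvPairOut pos i))
      [] (fun acc i _ => h1 i acc)]
  rw [PySem.List.foldl_append_eq_flatMap]
  simp

-- B as a flatMap over its sorted candidate lists
theorem pv_B_eq (pos : List (Int × Int)) :
    monomer_dimer_alt pos =
      (PySem.List.pyRange 0 (PySem.List.len pos) 1).flatMap (fun i =>
        (PySem.List.sorted (PySem.Set.ofList ((pvHits pos i).map (·.1))) (fun x => x) false).flatMap
          (fun j =>
            pvEmitL pos i j
              ((((pvHits pos i).find? (fun h => h.1 == j)).map (fun h => h.2)).getD ((0, 0), 0)).1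
              ((((pvHits pos i).find? (fun h => h.1 == j)).map (fun h => h.2)).getD ((0, 0), 0)).2)) := by
  have hB : monomer_dimer_alt pos =
      (PySem.List.pyRange 0 (PySem.List.len pos) 1).foldl (fun acc i =>
        (PySem.List.sorted (PySem.Set.ofList ((pvHits pos i).map (·.1))) (fun x => x) false).foldl
          (fun acc j =>
            (PySem.List.pyRange 0 (PySem.List.len pos) 1).foldl (fun acc k =>
              if k = i ∨ k = j then acc
              else acc ++
                [pvYield
                  ((((pvHits pos i).find? (fun h => h.1 == j)).map (fun h => h.2)).getD ((0, 0), 0)).1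
                  (pvGet pos k)
                  ((((pvHits pos i).find? (fun h => h.1 == j)).map (fun h => h.2)).getD ((0, 0), 0)).2]) acc)
          acc) [] := rfl
  rw [hB]
  have h1 : ∀ (i : Int) (acc : List (Int × Int)),
      (PySem.List.sorted (PySem.Set.ofList ((pvHits pos i).map (·.1))) (fun x => x) false).foldl
          (fun acc j =>
            (PySem.List.pyRange 0 (PySem.List.len pos) 1).foldl (fun acc k =>
              if k = i ∨ k = j then acc
              else acc ++
                [pvYield
                  ((((pvHits pos i).find? (fun h => h.1 == j)).map (fun h => h.2)).getD ((0, 0), 0)).1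
                  (pvGet pos k)
                  ((((pvHits pos i).find? (fun h => h.1 == j)).map (fun h => h.2)).getD ((0, 0), 0)).2]) acc)
          acc
      = acc ++ (PySem.List.sorted (PySem.Set.ofList ((pvHits pos i).map (·.1))) (fun x => x) false).flatMap
          (fun j =>
            pvEmitL pos i j
              ((((pvHits pos i).find? (fun h => h.1 == j)).map (fun h => h.2)).getD ((0, 0), 0)).1
              ((((pvHits pos i).find? (fun h => h.1 == j)).map (fun h => h.2)).getD ((0, 0), 0)).2) := by
    intro i acc
    rw [PySem.List.foldl_congr_mem
        (PySem.List.sorted (PySem.Set.ofList ((pvHits pos i).map (·.1))) (fun x => x) false)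
        (fun acc j =>
            (PySem.List.pyRange 0 (PySem.List.len pos) 1).foldl (fun acc k =>
              if k = i ∨ k = j then acc
              else acc ++
                [pvYield
                  ((((pvHits pos i).find? (fun h => h.1 == j)).map (fun h => h.2)).getD ((0, 0), 0)).1
                  (pvGet pos k)
                  ((((pvHits pos i).find? (fun h => h.1 == j)).map (fun h => h.2)).getD ((0, 0), 0)).2]) acc)
        (fun acc j => acc ++
            pvEmitL pos i j
              ((((pvHits pos i).find? (fun h => h.1 == j)).map (fun h => h.2)).getD ((0, 0), 0)).1
              ((((pvHits pos i).find? (fun h => h.1 == j)).map (fun h => h.2)).getD ((0, 0), 0)).2)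
        acc (by intro acc j _; beta_reduce; rw [pv_kfold])]
    rw [PySem.List.foldl_append_eq_flatMap]
  rw [PySem.List.foldl_congr_mem (PySem.List.pyRange 0 (PySem.List.len pos) 1) _
      (fun acc i => acc ++
        (PySem.List.sorted (PySem.Set.ofList ((pvHits pos i).map (·.1))) (fun x => x) false).flatMap
          (fun j =>
            pvEmitL pos i j
              ((((pvHits pos i).find? (fun h => h.1 == j)).map (fun h => h.2)).getD ((0, 0), 0)).1
              ((((pvHits pos i).find? (fun h => h.1 == j)).map (fun h => h.2)).getD ((0, 0), 0)).2))
      [] (fun acc i _ => h1 i acc)]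
  rw [PySem.List.foldl_append_eq_flatMap]
  simp

-- lookup in an index dict: the ascending list of indices whose key matches
theorem pv_idx_getD (pos : List (Int × Int)) (key : Int × Int → Int × Int) (v : Int × Int) :
    (pvIndexBy pos key).getD v [] =
      (PySem.List.pyRange 0 (PySem.List.len pos) 1).filter (fun j => key (pvGet pos j) == v) := by
  unfold pvIndexBy
  have h := PySem.Dict.getD_foldl_modify_append
      ((PySem.List.enumerate pos).map (fun jp => ((key jp.2 : Int × Int), jp.1)))
      PySem.Dict.empty v
  rw [List.foldl_map] at h
  dsimp only at h
  rw [h, PySem.Dict.getD_empty, List.filter_map, List.map_map,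
    PySem.List.enumerate_eq_map_pyRange pos ((0, 0) : Int × Int), List.filter_map, List.map_map]
  simp [Function.comp_def, pvGet]

-- A's offset loop as a six-way if chain on tuple equalities
theorem pv_findC_iff (a b : Int × Int) :
    pvFindC a b pvOffs3 =
      (if pvShift a 1 0 = b then some (a, 0)
       else if pvShift b 1 0 = a then some (b, 0)
       else if pvShift a 0 1 = b then some (a, 1)
       else if pvShift b 0 1 = a then some (b, 1)
       else if pvShift a (-1) 1 = b then some (a, 2)
       else if pvShift b (-1) 1 = a then some (b, 2)
       else none) := by
  simp only [pvFindC, pvOffs3, pvShift, Prod.ext_iff]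

theorem pv_BF_eq (pos : List (Int × Int)) (i r dx dy : Int) :
    pvBF pos i r dx dy =
      ((PySem.List.pyRange 0 (PySem.List.len pos) 1).filter
          (fun j => decide (j > i) && (pvShift (pvGet pos i) dx dy == pvGet pos j))).map
        (fun j => (j, pvGet pos i, r)) := by
  unfold pvBF
  rw [pv_idx_getD, pv_filterMap_if (fun j => j > i) (fun j => (j, pvGet pos i, r)),
    List.filter_filter]
  refine congrArg (List.map _) (List.filter_congr (fun j _ => ?_))
  by_cases h : pvGet pos j = pvShift (pvGet pos i) dx dy
  · rw [h]
  · have h' : ¬(pvShift (pvGet pos i) dx dy = pvGet pos j) := fun hh => h hh.symm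
    rw [beq_eq_false_iff_ne.mpr h, beq_eq_false_iff_ne.mpr h']

theorem pv_BR_eq (pos : List (Int × Int)) (i r dx dy : Int) :
    pvBR pos i r dx dy =
      ((PySem.List.pyRange 0 (PySem.List.len pos) 1).filter
          (fun j => decide (j > i) && (pvShift (pvGet pos j) dx dy == pvGet pos i))).map
        (fun j => (j, pvGet pos j, r)) := by
  unfold pvBR
  rw [pv_idx_getD, pv_filterMap_if (fun j => j > i) (fun j => (j, pvGet pos j, r)),
    List.filter_filter]

-- the offset loop succeeds iff one of the six adjacency tests holds
theorem pv_isSome_iff (a b : Int × Int) :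
    ((pvFindC a b pvOffs3).isSome = true) ↔
      (pvShift a 1 0 = b ∨ pvShift b 1 0 = a ∨ pvShift a 0 1 = b ∨ pvShift b 0 1 = a ∨
       pvShift a (-1) 1 = b ∨ pvShift b (-1) 1 = a) := by
  rw [pv_findC_iff]; split_ifs <;> simp_all

-- the candidate indices are exactly the in-range neighbours above i
theorem pv_mem_keys (pos : List (Int × Int)) (i a : Int) :
    a ∈ (pvHits pos i).map (·.1) ↔ (0 ≤ a ∧ a < PySem.List.len pos ∧ i < a ∧
      (pvShift (pvGet pos i) 1 0 = pvGet pos a ∨ pvShift (pvGet pos a) 1 0 = pvGet pos i ∨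
       pvShift (pvGet pos i) 0 1 = pvGet pos a ∨ pvShift (pvGet pos a) 0 1 = pvGet pos i ∨
       pvShift (pvGet pos i) (-1) 1 = pvGet pos a ∨ pvShift (pvGet pos a) (-1) 1 = pvGet pos i)) := by
  simp only [pvHits, List.map_append, List.mem_append, pv_BF_eq, pv_BR_eq, List.map_map,
    Function.comp_def]
  simp [List.mem_filter, PySem.List.mem_pyRange_one, beq_iff_eq, PySem.List.len_eq]
  constructor <;> intro h <;> tauto

-- first hit for candidate j is exactly A's offset-loop result
theorem pv_find_eq (pos : List (Int × Int)) (i j : Int) (h0 : 0 ≤ j)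
    (hn : j < PySem.List.len pos) (hij : i < j) :
    (pvHits pos i).find? (fun h => h.1 == j) =
      (pvFindC (pvGet pos i) (pvGet pos j) pvOffs3).map (fun cr => (j, cr)) := by
  have hn' : j < (pos.length : Int) := by simpa using hn
  rw [pv_findC_iff]
  simp only [pvHits, pv_BF_eq, pv_BR_eq, List.find?_append, List.find?_map, Function.comp_def,
    pv_find?_beq_self, List.mem_filter, PySem.List.mem_pyRange_one, PySem.List.len_eq,
    Bool.and_eq_true, decide_eq_true_eq, beq_iff_eq]
  by_cases c1 : pvShift (pvGet pos i) 1 0 = pvGet pos j <;>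
  by_cases c2 : pvShift (pvGet pos j) 1 0 = pvGet pos i <;>
  by_cases c3 : pvShift (pvGet pos i) 0 1 = pvGet pos j <;>
  by_cases c4 : pvShift (pvGet pos j) 0 1 = pvGet pos i <;>
  by_cases c5 : pvShift (pvGet pos i) (-1) 1 = pvGet pos j <;>
  by_cases c6 : pvShift (pvGet pos j) (-1) 1 = pvGet pos i <;>
  simp [c1, c2, c3, c4, c5, c6, h0, hn', hij, Option.or]

-- B's sorted candidate list is A's filtered j-range
theorem pv_sorted_eq (pos : List (Int × Int)) (i : Int) (hi : 0 ≤ i) :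
    PySem.List.sorted (PySem.Set.ofList ((pvHits pos i).map (·.1))) (fun x => x) false =
      (PySem.List.pyRange (i + 1) (PySem.List.len pos) 1).filter
        (fun j => (pvFindC (pvGet pos i) (pvGet pos j) pvOffs3).isSome) := by
  refine PySem.List.sorted_eq_of_perm_of_pairwise_lt _ _ _ ?_ ?_
  · refine (List.perm_ext_iff_of_nodup (List.Nodup.filter _ (PySem.List.nodup_pyRange_one _ _))
      (PySem.Set.nodup_ofList _)).mpr ?_
    intro a
    rw [List.mem_filter, PySem.List.mem_pyRange_one, PySem.Set.mem_ofList, pv_mem_keys,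
      pv_isSome_iff]
    constructor
    · rintro ⟨⟨h1, h2⟩, hd⟩
      exact ⟨by omega, h2, by omega, hd⟩
    · rintro ⟨h1, h2, h3, hd⟩
      exact ⟨⟨by omega, h2⟩, hd⟩
  · exact List.Pairwise.filter _ (PySem.List.pairwise_lt_pyRange_one _ _)

theorem monomer_dimer_main : ∀ pos, monomer_dimer pos = monomer_dimer_alt pos := by
  intro pos
  rw [pv_A_eq, pv_B_eq]
  refine pv_flatMap_congr _ _ _ (fun i hi => ?_)
  have hi0 : 0 ≤ i := by
    have := (PySem.List.mem_pyRange_one.mp hi).1; omega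
  rw [pv_sorted_eq pos i hi0]
  refine (pv_flatMap_filter _ _ _ _ ?_ ?_).symm
  · intro j hj hfalse
    unfold pvPairOut
    rcases hF : pvFindC (pvGet pos i) (pvGet pos j) pvOffs3 with _ | ⟨c, rot⟩
    · rfl
    · exfalso; rw [hF] at hfalse; simp at hfalse
  · intro j hj htrue
    have hj' := PySem.List.mem_pyRange_one.mp hj
    have hfind := pv_find_eq pos i j (by omega) (by omega) (by omega)
    unfold pvPairOut
    rcases hF : pvFindC (pvGet pos i) (pvGet pos j) pvOffs3 with _ | ⟨c, rot⟩
    · rw [hF] at htrue; simp at htrue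
    · rw [hfind, hF]; rfl

-- ===== VERDICT (by name: the statement is the Claim_ definition above) =====
theorem monomer_dimer_spec : Claim_equal_monomer_dimer := by
  intro pos _
  unfold Spec_monomer_dimer
  exact monomer_dimer_main pos
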